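-- pv_equiv track=rewrite | github.com/DaniCerri/lezioniPython-B22-292-2025 | Soluzioni/Esercizio_libreria.py | genere_piu_venduto
-- ===== SOURCE A (Python) =====
-- def genere_piu_venduto(dizionario: dict) -> str:
--     """
--     Dati i dati di vendita, trova il genere con più vendite
--     :param dizionario: dizionario con i dati di vendita
--     :return: genere, str
--     """
--     # 1. Dobbiamo calcolare quante vendite ha fatto ogni genere
--     vendite = {}  # Creiamo un dizionario vuoto in cui mettere i totali
--     for genere, dati in dizionario.items():  # Per ogni genere e dati corrispondenti
--         # Andiamo a creare nel dizionario vendite un nuovo campo con chiave il genere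
--         # corrente e valore la somma delle sue vendite
--         vendite[genere] = sum(dati)
--
--     # 2. Cerchiamo il genere con il valore più alto
--     # Scegliamo un genere a caso e "fingiamo" che sia il massimo
--     genere_massimo = list(vendite.keys())[0]
--     for genere, tot_vendite in vendite.items():  # Per ogni genere e totale vendite
--         # Se il dizionario alla chiave del massimo è minore del valore attuale
--         if vendite[genere_massimo] < tot_vendite:
--             # Vuol dire che abbiamo trovato il genere a cui si trova il massimo (fin'ora)
--             genere_massimo = genere
--
--     # 3. Restituiamo il genere trovato
--     return genere_massimo
-- ===== SOURCE B (Python) =====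
-- def genere_piu_venduto(dizionario: dict) -> str:
--     """Build a ranking: stable-sort the genres by total sales, descending, and return the top one."""
--     classifica = sorted(dizionario.items(), key=lambda kv: sum(kv[1]), reverse=True)
--     return classifica[0][0]
-- ===== Notes on version B (the rewrite author's own statement) =====
-- stated objective: alternative
-- what changed: B replaces A's two-pass argmax scan (build a totals dict, then track a running maximum with repeated dict lookups) by a stable descending sort of the items by total sales followed by taking the head; stability of Python's sort makes the head the first maximal genre in insertion order, exactly A's strict-'<' tie-breaking.
import Mathlib
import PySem

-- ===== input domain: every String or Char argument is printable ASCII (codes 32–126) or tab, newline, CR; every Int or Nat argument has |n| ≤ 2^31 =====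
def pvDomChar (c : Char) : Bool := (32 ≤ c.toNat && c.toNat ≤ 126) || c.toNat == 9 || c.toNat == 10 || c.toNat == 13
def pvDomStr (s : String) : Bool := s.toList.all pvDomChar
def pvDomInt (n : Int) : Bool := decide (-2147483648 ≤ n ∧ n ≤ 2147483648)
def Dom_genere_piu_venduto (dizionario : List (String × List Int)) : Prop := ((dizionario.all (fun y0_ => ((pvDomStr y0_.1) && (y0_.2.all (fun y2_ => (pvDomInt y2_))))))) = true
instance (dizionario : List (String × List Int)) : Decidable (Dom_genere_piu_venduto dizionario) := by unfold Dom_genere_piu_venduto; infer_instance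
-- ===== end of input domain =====

-- B replaces A's totals-dict + running-maximum scan by a stable descending sort of the
-- items by total sales followed by taking the head; objective: alternative algorithm.


-- ===== PORT A =====
def genere_piu_venduto (dizionario : List (String × List Int)) : String :=
  -- vendite = {}; for genere, dati in dizionario.items(): vendite[genere] = sum(dati)
  let vendite : PySem.Dict String Int :=
    dizionario.foldl (fun acc p => acc.insert p.1 p.2.sum) PySem.Dict.empty
  -- genere_massimo = list(vendite.keys())[0]   (IndexError on empty dict; excluded by Pre_)
  let genere_massimo0 : String :=
    match PySem.List.pyGet? (PySem.Dict.keys vendite) 0 with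
    | some g => g
    | none => ""
  -- for genere, tot_vendite in vendite.items(): if vendite[genere_massimo] < tot_vendite: …
  -- (vendite[genere_massimo] via getD: the key is always present, so no KeyError arises)
  vendite.items.foldl
    (fun gm p => if vendite.getD gm 0 < p.2 then p.1 else gm) genere_massimo0

-- ===== PORT B =====
def genere_piu_venduto_alt (dizionario : List (String × List Int)) : String :=
  -- classifica = sorted(dizionario.items(), key=lambda kv: sum(kv[1]), reverse=True)
  let classifica := PySem.List.sorted dizionario (fun kv => kv.2.sum) true
  -- return classifica[0][0]   (IndexError on empty dict; excluded by Pre_)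
  match PySem.List.pyGet? classifica 0 with
  | some p => p.1
  | none => ""

-- ===== PRECONDITION & SPEC =====
-- Pre_ excludes the empty dict (A raises IndexError there) and association lists with
-- duplicate keys, which cannot arise from a Python dict argument.
def Pre_genere_piu_venduto (dizionario : List (String × List Int)) : Prop :=
  dizionario ≠ [] ∧ (dizionario.map Prod.fst).Nodup
instance (dizionario : List (String × List Int)) : Decidable (Pre_genere_piu_venduto dizionario) := by unfold Pre_genere_piu_venduto; infer_instance
def pvWitness_genere_piu_venduto : (List (String × List Int)) :=
  [("rock", [3, 4]), ("jazz", [10]), ("pop", [2, 2, 2])]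
def Spec_genere_piu_venduto (dizionario : List (String × List Int)) (out : String) : Prop := out = genere_piu_venduto_alt dizionario
instance (dizionario : List (String × List Int)) (out : String) : Decidable (Spec_genere_piu_venduto dizionario out) := by unfold Spec_genere_piu_venduto; infer_instance

-- ===== CLAIM (what is proved, stated in full; the proofs are below) =====
def Claim_equal_genere_piu_venduto : Prop := ∀ (dizionario : List (String × List Int)), Dom_genere_piu_venduto dizionario → Pre_genere_piu_venduto dizionario → Spec_genere_piu_venduto dizionario (genere_piu_venduto dizionario)

-- ===== LEMMAS AND PROOFS =====

-- The totals dict built by A's first loop is just the list of (genre, sum) pairs.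
theorem vendite_items (l : List (String × List Int)) (hnd : (l.map Prod.fst).Nodup) :
    (l.foldl (fun acc p => acc.insert p.1 p.2.sum) (PySem.Dict.empty : PySem.Dict String Int)).items
      = l.map (fun p => (p.1, p.2.sum)) := by
  have h := PySem.Dict.items_foldl_insert_fresh (l := l) (k := Prod.fst)
      (v := fun p => p.2.sum) (d := (PySem.Dict.empty : PySem.Dict String Int))
      (by intro a _; simp [PySem.Dict.contains_empty]) hnd
  simpa [PySem.Dict.empty] using h

-- Core invariant: inserting the remaining items one by one into a (reverse-)sorted
-- accumulator keeps at its head exactly the genre A's running-maximum loop would hold,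
-- because insertBy puts x in front iff the current head's total is strictly smaller.
theorem sort_head (d : PySem.Dict String Int) (t : List (String × List Int)) :
    ∀ (g : String) (ds : List Int) (l : List (String × List Int)),
    d.get? g = some ds.sum →
    (∀ p ∈ t, d.get? p.1 = some p.2.sum) →
    ∃ (q : List Int) (l' : List (String × List Int)),
      t.foldl (fun acc x =>
          PySem.List.insertBy (fun a b => decide ((b.2.sum : Int) < a.2.sum)) x acc)
        ((g, ds) :: l)
        = (t.foldl (fun gm p => if d.getD gm 0 < p.2.sum then p.1 else gm) g, q) :: l' := by
  induction t with
  | nil => intro g ds l hg _; exact ⟨ds, l, rfl⟩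
  | cons p t ih =>
    intro g ds l hg ht
    have hgD : d.getD g 0 = ds.sum := by rw [PySem.Dict.getD_eq_get?_getD, hg]; rfl
    simp only [List.foldl_cons, PySem.List.insertBy, hgD]
    by_cases h : ds.sum < p.2.sum
    · simp only [h, decide_true, if_pos]
      have := ih p.1 p.2 ((g, ds) :: l) (ht p (by simp))
        (fun q hq => ht q (by simp [hq]))
      simpa [h] using this
    · simp only [h, decide_false, if_false]
      have := ih g ds (PySem.List.insertBy
          (fun a b => decide ((b.2.sum : Int) < a.2.sum)) p l) hg
        (fun q hq => ht q (by simp [hq]))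
      simpa [h] using this

-- ===== VERDICT (by name: the statement is the Claim_ definition above) =====
theorem genere_piu_venduto_spec : Claim_equal_genere_piu_venduto := by
  intro dizionario _ hpre
  obtain ⟨hne, hnd⟩ := hpre
  unfold Spec_genere_piu_venduto genere_piu_venduto genere_piu_venduto_alt
  match dizionario, hne with
  | (g0, d0) :: rest, _ =>
    have hnd' : (((g0, d0) :: rest).map Prod.fst).Nodup := hnd
    set D := ((g0, d0) :: rest : List (String × List Int)) with hD
    set vendite := D.foldl (fun acc p => acc.insert p.1 p.2.sum)
      (PySem.Dict.empty : PySem.Dict String Int) with hv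
    have hitems : vendite.items = D.map (fun p => (p.1, p.2.sum)) :=
      vendite_items D hnd'
    have hkeysnd : vendite.keys.Nodup := by
      simp only [PySem.Dict.keys, hitems]
      simpa [Function.comp] using hnd'
    have hkey0 : PySem.List.pyGet? (PySem.Dict.keys vendite) 0 = some g0 := by
      simp [PySem.Dict.keys, hitems, hD, PySem.List.pyGet?, PySem.List.pyIdx?]
    have hlook : ∀ p ∈ D, vendite.get? p.1 = some p.2.sum := by
      intro p hp
      have hmem : (p.1, p.2.sum) ∈ vendite.items := by
        rw [hitems]; exact List.mem_map.2 ⟨p, hp, rfl⟩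
      exact PySem.Dict.get?_of_mem_items vendite hmem hkeysnd
    have hm0 : vendite.get? g0 = some d0.sum := hlook (g0, d0) (by simp [hD])
    have hg0D : vendite.getD g0 0 = d0.sum := by
      rw [PySem.Dict.getD_eq_get?_getD, hm0]; rfl
    -- A's side: fold over items = fold over D with totals substituted
    simp only [hkey0, hitems, List.foldl_map]
    -- first step of A's fold keeps g0
    have hAstep : D.foldl (fun gm p => if vendite.getD gm 0 < p.2.sum then p.1 else gm) g0
        = rest.foldl (fun gm p => if vendite.getD gm 0 < p.2.sum then p.1 else gm) g0 := by
      simp [hD, hg0D]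
    -- B's side: sorted rev = foldl insertBy, first step yields [(g0, d0)]
    rw [PySem.List.sorted_rev_eq_foldl_insertBy]
    have hlook' : ∀ p ∈ rest, vendite.get? p.1 = some p.2.sum :=
      fun p hp => hlook p (by simp [hD, hp])
    obtain ⟨q, l', hB⟩ := sort_head vendite rest g0 d0 [] hm0 hlook'
    simp only [hD, List.foldl_cons, PySem.List.insertBy] at hB ⊢
    rw [hB]
    simp [PySem.List.pyGet?, PySem.List.pyIdx?, hg0D]
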